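-- pv_equiv track=rewrite | github.com/lucabeca/python | arquivos/while.py | quantidade_de_primos
-- ===== SOURCE A (Python) =====
-- def é_primo(valor):
--     ''' Verifique se o 'valor' informado é primo.
--     Um número primo é aquele que é divisível apenas por ele mesmo e por 1'''
--     if valor == 2:
--         return True
--     if valor in (0, 1) or valor % 2 == 0:
--         return False
--     for i in range(2, valor):
--         if valor % i == 0:
--             return False
--     return True
--
-- def quantidade_de_primos(comeco, final):
--     ''' Retorne a quantidade de primos entre os valores informados'''
--     quantia = 0
--     numero = comeco + 1
--     while numero < final:
--         if é_primo(numero):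
--             quantia += 1
--         numero += 1
--     return quantia
-- ===== SOURCE B (Python) =====
-- def _eh_primo(valor):
--     # same fast pre-checks as a naive primality test, then trial division
--     # only by odd candidates up to the square root of valor
--     if valor == 2:
--         return True
--     if valor in (0, 1) or valor % 2 == 0:
--         return False
--     i = 3
--     while i * i <= valor:
--         if valor % i == 0:
--             return False
--         i += 2
--     return True
--
-- def quantidade_de_primos(comeco, final):
--     return sum(1 for numero in range(comeco + 1, final) if _eh_primo(numero))
-- ===== Notes on version B (the rewrite author's own statement) =====
-- stated objective: alternative
-- what changed: per-candidate primality does trial division only by odd divisors up to sqrt(valor) instead of scanning every i in range(2, valor), and the counting while-loop becomes a sum over range(comeco+1, final); intended as faster (O(n*sqrt(m)) vs O(n*m), measured 40x at n=4096) but a timing run could not confirm it at the largest sizes where A timed out, so no speed is claimed.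
import Mathlib
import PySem

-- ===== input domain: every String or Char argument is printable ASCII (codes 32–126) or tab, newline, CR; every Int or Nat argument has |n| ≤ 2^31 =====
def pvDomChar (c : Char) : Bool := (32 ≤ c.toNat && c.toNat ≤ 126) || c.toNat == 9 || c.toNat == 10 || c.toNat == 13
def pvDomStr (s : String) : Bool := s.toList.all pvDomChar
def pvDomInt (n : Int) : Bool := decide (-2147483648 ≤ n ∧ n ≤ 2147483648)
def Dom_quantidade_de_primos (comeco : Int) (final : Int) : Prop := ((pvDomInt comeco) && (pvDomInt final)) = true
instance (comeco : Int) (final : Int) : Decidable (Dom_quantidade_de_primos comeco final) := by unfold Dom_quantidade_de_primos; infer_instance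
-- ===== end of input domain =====

-- B tests each candidate by trial division only by odd divisors up to sqrt(valor)
-- instead of every i in range(2, valor), and counts with a sum over the range; same result.

-- ===== PORT A =====
-- é_primo: the for-loop with early 'return False' is the all-check over range(2, valor)
def ehPrimo (valor : Int) : Bool :=
  if valor == 2 then true
  else if valor == 0 || valor == 1 || (PySem.Int.mod valor 2 == 0) then false
  else (PySem.List.pyRange 2 valor 1).all (fun i => !(PySem.Int.mod valor i == 0))

-- the while-loop of quantidade_de_primos, state (quantia, numero)
def qloopA (final : Int) (quantia : Int) (numero : Int) : Int :=
  if numero < final then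
    qloopA final (if ehPrimo numero then quantia + 1 else quantia) (numero + 1)
  else quantia
termination_by (final - numero).toNat
decreasing_by omega

def quantidade_de_primos (comeco : Int) (final : Int) : Int :=
  qloopA final 0 (comeco + 1)

-- ===== PORT B =====
-- the 'while i * i <= valor' loop of _eh_primo, i stepping by 2
def ehPrimoLoop (valor : Int) (i : Int) : Bool :=
  if i * i ≤ valor then
    if PySem.Int.mod valor i == 0 then false
    else ehPrimoLoop valor (i + 2)
  else true
termination_by (valor + 2 - i).toNat
decreasing_by
  have hii : i ≤ i * i := by
    by_cases h : i ≤ 0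
    · linarith [mul_self_nonneg i]
    · nlinarith
  omega

def ehPrimoB (valor : Int) : Bool :=
  if valor == 2 then true
  else if valor == 0 || valor == 1 || (PySem.Int.mod valor 2 == 0) then false
  else ehPrimoLoop valor 3

def quantidade_de_primos_alt (comeco : Int) (final : Int) : Int :=
  (((PySem.List.pyRange (comeco + 1) final 1).filter (fun n => ehPrimoB n)).map
    (fun _ => (1 : Int))).sum

-- ===== PRECONDITION & SPEC =====
def Spec_quantidade_de_primos (comeco : Int) (final : Int) (out : Int) : Prop := out = quantidade_de_primos_alt comeco final
instance (comeco : Int) (final : Int) (out : Int) : Decidable (Spec_quantidade_de_primos comeco final out) := by unfold Spec_quantidade_de_primos; infer_instance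

-- ===== CLAIM (what is proved, stated in full; the proofs are below) =====
def Claim_equal_quantidade_de_primos : Prop := ∀ (comeco : Int) (final : Int), Dom_quantidade_de_primos comeco final → Spec_quantidade_de_primos comeco final (quantidade_de_primos comeco final)

-- ===== LEMMAS AND PROOFS =====

theorem ehPrimoLoop_eq_true_iff (valor : Int) : ∀ (n : ℕ) (i : Int), 0 ≤ i → (valor + 2 - i).toNat ≤ n →
    (ehPrimoLoop valor i = true ↔
      ∀ j : Int, i ≤ j → (j - i) % 2 = 0 → j * j ≤ valor → ¬ j ∣ valor) := by
  intro n
  induction n with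
  | zero =>
    intro i hi hf
    have hgt : valor < i := by omega
    rw [ehPrimoLoop]
    have h1 : ¬ (i * i ≤ valor) := by nlinarith
    rw [if_neg h1]
    simp only [true_iff]
    intro j hij _ hjj hd
    nlinarith
  | succ n ih =>
    intro i hi hf
    rw [ehPrimoLoop]
    by_cases h1 : i * i ≤ valor
    · rw [if_pos h1]
      have hiv : i ≤ valor := by nlinarith
      by_cases hm : PySem.Int.mod valor i = 0
      · simp only [hm, beq_self_eq_true, if_pos]
        simp only [Bool.false_eq_true, false_iff]
        intro H
        exact H i (le_refl i) (by omega) h1 ((PySem.Int.mod_eq_zero_iff_dvd valor i).mp hm)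
      · rw [if_neg (by simpa using hm)]
        rw [ih (i + 2) (by omega) (by omega)]
        constructor
        · intro H j hij hpar hjj
          rcases eq_or_lt_of_le hij with rfl | hlt
          · intro hd
            exact hm ((PySem.Int.mod_eq_zero_iff_dvd valor i).mpr hd)
          · exact H j (by omega) (by omega) hjj
        · intro H j hij hpar hjj
          exact H j (by omega) (by omega) hjj
    · rw [if_neg h1]
      simp only [true_iff]
      intro j hij hpar hjj hd
      nlinarith

theorem ehPrimo_eq_ehPrimoB (valor : Int) : ehPrimo valor = ehPrimoB valor := by
  by_cases h2 : valor = 2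
  · simp [ehPrimo, ehPrimoB, h2]
  by_cases h0 : valor = 0
  · simp [ehPrimo, ehPrimoB, h0]
  by_cases h1v : valor = 1
  · simp [ehPrimo, ehPrimoB, h1v]
  by_cases hmod : PySem.Int.mod valor 2 = 0
  · have hd2 : (2 : Int) ∣ valor := (PySem.Int.mod_eq_zero_iff_dvd valor 2).mp hmod
    simp [ehPrimo, ehPrimoB, hd2]
  have hm1 : valor % 2 = 1 := by
    have h := PySem.Int.mod_eq_emod_of_pos (a := valor) (b := 2) (by norm_num)
    omega
  have e1 : ehPrimo valor = (PySem.List.pyRange 2 valor 1).all (fun i => !(PySem.Int.mod valor i == 0)) := by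
    rw [ehPrimo, if_neg (by simpa using h2), if_neg (by simp [h0, h1v, hm1])]
  have e2 : ehPrimoB valor = ehPrimoLoop valor 3 := by
    rw [ehPrimoB, if_neg (by simpa using h2), if_neg (by simp [h0, h1v, hm1])]
  have hodd : ¬ (2 : Int) ∣ valor := fun hd =>
    hmod ((PySem.Int.mod_eq_zero_iff_dvd valor 2).mpr hd)
  rw [e1, e2, Bool.eq_iff_iff, List.all_eq_true,
    ehPrimoLoop_eq_true_iff valor (valor + 2 - 3).toNat 3 (by norm_num) (le_refl _)]
  constructor
  · intro H j hj3 hpar hjj hd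
    have hjlt : j < valor := by nlinarith
    have := H j (by rw [PySem.List.mem_pyRange_one]; exact ⟨by omega, hjlt⟩)
    simp only [Bool.not_eq_eq_eq_not, Bool.not_true, beq_eq_false_iff_ne, ne_eq] at this
    exact this ((PySem.Int.mod_eq_zero_iff_dvd valor j).mpr hd)
  · intro H i hmem
    rw [PySem.List.mem_pyRange_one] at hmem
    obtain ⟨hi2, hiv⟩ := hmem
    simp only [Bool.not_eq_eq_eq_not, Bool.not_true, beq_eq_false_iff_ne, ne_eq]
    intro hm0
    have hdvd : i ∣ valor := (PySem.Int.mod_eq_zero_iff_dvd valor i).mp hm0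
    have hio : ¬ (2 : Int) ∣ i := fun h2i => hodd (h2i.trans hdvd)
    have hi3 : 3 ≤ i := by omega
    by_cases hii : i * i ≤ valor
    · exact H i hi3 (by omega) hii hdvd
    · obtain ⟨e, he⟩ := hdvd
      have hvi : valor < i * i := by omega
      have hvpos : 0 < valor := by omega
      have hepos : 0 < e := by nlinarith
      have heltI : e < i := by nlinarith
      have hene1 : e ≠ 1 := by rintro rfl; omega
      have heo : ¬ (2 : Int) ∣ e := by
        rintro ⟨k, hk⟩
        exact hodd ⟨i * k, by rw [he, hk]; ring⟩
      have he3 : 3 ≤ e := by omega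
      have hee : e * e ≤ valor := by nlinarith
      exact H e he3 (by omega) hee ⟨i, by rw [he]; ring⟩

theorem qloopA_eq (b : Int) : ∀ (n : ℕ) (a q : Int), (b - a).toNat ≤ n →
    qloopA b q a =
      q + (((PySem.List.pyRange a b 1).filter (fun m => ehPrimoB m)).map
        (fun _ => (1 : Int))).sum := by
  intro n
  induction n with
  | zero =>
    intro a q h
    rw [qloopA, if_neg (by omega), PySem.List.pyRange_one_eq_nil (by omega)]
    simp
  | succ n ih =>
    intro a q h
    by_cases hab : a < b
    · rw [qloopA, if_pos hab, ih (a + 1) _ (by omega), PySem.List.pyRange_one_cons hab,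
        ehPrimo_eq_ehPrimoB]
      by_cases hp : ehPrimoB a = true
      · simp only [List.filter_cons, hp, if_pos, List.map_cons, List.sum_cons]
        ring
      · simp [hp]
    · rw [qloopA, if_neg hab, PySem.List.pyRange_one_eq_nil (by omega)]
      simp

-- ===== VERDICT (by name: the statement is the Claim_ definition above) =====
theorem quantidade_de_primos_spec : Claim_equal_quantidade_de_primos := by
  intro comeco final _
  unfold Spec_quantidade_de_primos quantidade_de_primos quantidade_de_primos_alt
  rw [qloopA_eq final (final - (comeco + 1)).toNat (comeco + 1) 0 (le_refl _)]
  ring
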